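-- pv_equiv track=rewrite | github.com/yeatonj/adventOfCode2015 | day5/NaughtyOrNiceString.py | naughty_check
-- ===== SOURCE A (Python) =====
-- def naughty_check(bad_words, line_in):
--     duplicate = False
--     bad_word = False
--     vowels = "aeiou"
--     letter_dict = {}
--     for i in range(len(line_in)):
--         curr_count = letter_dict.setdefault(line_in[i], 0)
--         letter_dict.update({line_in[i]:curr_count + 1})
--         if i < len(line_in) - 1:
--             two_let = line_in[i] + line_in[i+1]
--             if not duplicate:
--                 duplicate = check_duplicate(two_let)
--             if not bad_word and two_let in bad_words:
--                 bad_word = True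
--
--     vowel_count = 0
--     for char in vowels:
--         vowel_count += letter_dict.setdefault(char, 0)
--
--     return not ((vowel_count >=3) and (not bad_word) and (duplicate))
--
-- def check_duplicate(two_letters):
--     if (two_letters[0] == two_letters[1]):
--         return True
--     return False
-- ===== SOURCE B (Python) =====
-- def naughty_check(bad_words, line_in):
--     vowel_count = sum(c in "aeiou" for c in line_in)
--     pairs = list(zip(line_in, line_in[1:]))
--     duplicate = any(a == b for a, b in pairs)
--     bad_word = any(a + b in bad_words for a, b in pairs)
--     return not (vowel_count >= 3 and not bad_word and duplicate)
-- ===== Notes on version B (the rewrite author's own statement) =====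
-- stated objective: simpler
-- what changed: Replaced the single index loop that builds a letter-frequency dict (later summed over the vowels) and threads duplicate/bad-word flags with three independent scans: a direct vowel count, and two any() scans over adjacent character pairs.
import Mathlib
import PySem

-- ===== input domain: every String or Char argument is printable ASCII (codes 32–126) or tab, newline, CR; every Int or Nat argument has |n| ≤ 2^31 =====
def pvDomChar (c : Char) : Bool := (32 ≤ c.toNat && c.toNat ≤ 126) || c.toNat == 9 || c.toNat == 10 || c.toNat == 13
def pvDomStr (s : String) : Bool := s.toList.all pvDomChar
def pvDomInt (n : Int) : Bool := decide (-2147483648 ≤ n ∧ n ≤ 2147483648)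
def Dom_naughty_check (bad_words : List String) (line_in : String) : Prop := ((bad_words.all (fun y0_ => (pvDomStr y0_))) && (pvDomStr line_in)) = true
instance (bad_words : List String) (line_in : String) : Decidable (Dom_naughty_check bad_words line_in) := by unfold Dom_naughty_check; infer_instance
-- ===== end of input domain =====

-- B replaces A's single dict-building index loop with three independent direct scans (simpler decomposition).

-- ===== PORT A =====
-- helper check_duplicate(two_letters); the Option match only totalises the 2-char indexing (Python would raise on shorter strings, never reached here)
def check_duplicate (two_letters : String) : Bool :=
  match PySem.Str.pyGet? two_letters 0, PySem.Str.pyGet? two_letters 1 with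
  | some a, some b => if a == b then true else false
  | _, _ => false

-- the main loop of A: for i in range(len(line_in)), recursing on the character list; the
-- "i < len - 1" branch is exactly "the rest of the list is nonempty" with line_in[i+1] its head
def naughtyLoop (bad_words : List String) :
    PySem.Dict Char Int → Bool → Bool → List Char → PySem.Dict Char Int × Bool × Bool
  | d, dup, bad, [] => (d, dup, bad)
  | d, dup, bad, c :: rest =>
    let curr := d.getD c 0
    let d2 := (d.setdefault c 0).insert c (curr + 1)
    match rest with
    | [] => (d2, dup, bad)
    | c2 :: _ =>
      let two_let := String.ofList [c, c2]
      let dup2 := if !dup then check_duplicate two_let else dup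
      let bad2 := if !bad && bad_words.contains two_let then true else bad
      naughtyLoop bad_words d2 dup2 bad2 rest

def naughty_check (bad_words : List String) (line_in : String) : Bool :=
  match naughtyLoop bad_words PySem.Dict.empty false false line_in.toList with
  | (d, dup, bad) =>
    -- vowel_count += letter_dict.setdefault(char, 0): the value added is d.getD char 0;
    -- the setdefault's insertion of a missing vowel (value 0) never changes a later getD value
    let vowel_count := "aeiou".toList.foldl (fun (acc : Int) ch => acc + d.getD ch 0) 0
    !(decide (vowel_count ≥ 3) && !bad && dup)

-- ===== PORT B =====
def naughty_check_alt (bad_words : List String) (line_in : String) : Bool :=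
  let l := line_in.toList
  let vowel_count : Int := (l.map (fun c => if ("aeiou".toList).contains c then (1 : Int) else 0)).sum
  let pairs := l.zip l.tail
  let duplicate := pairs.any (fun p => p.1 == p.2)
  let bad_word := pairs.any (fun p => bad_words.contains (String.ofList [p.1, p.2]))
  !(decide (vowel_count ≥ 3) && !bad_word && duplicate)

-- ===== PRECONDITION & SPEC =====
def Spec_naughty_check (bad_words : List String) (line_in : String) (out : Bool) : Prop := out = naughty_check_alt bad_words line_in
instance (bad_words : List String) (line_in : String) (out : Bool) : Decidable (Spec_naughty_check bad_words line_in out) := by unfold Spec_naughty_check; infer_instance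

-- ===== CLAIM (what is proved, stated in full; the proofs are below) =====
def Claim_equal_naughty_check : Prop := ∀ (bad_words : List String) (line_in : String), Dom_naughty_check bad_words line_in → Spec_naughty_check bad_words line_in (naughty_check bad_words line_in)

-- ===== LEMMAS AND PROOFS =====

-- one dict step of A's loop, at the level of getD values
lemma getD_step (d : PySem.Dict Char Int) (c v : Char) :
    ((d.setdefault c 0).insert c (d.getD c 0 + 1)).getD v 0 =
      d.getD v 0 + if c == v then 1 else 0 := by
  by_cases h : v = c
  · subst h
    simp [PySem.Dict.getD_insert_self]
  · have hb : (c == v) = false := by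
      simp only [beq_eq_false_iff_ne]; exact fun e => h e.symm
    rw [PySem.Dict.getD_insert_of_ne _ _ _ h, hb]
    simp [PySem.Dict.getD, PySem.Dict.get?_setdefault_of_ne _ _ h]

-- A's loop, characterised: the dict counts the processed characters, the flags are ORs over adjacent pairs
lemma naughtyLoop_spec (bad_words : List String) :
    ∀ (l : List Char) (d : PySem.Dict Char Int) (dup bad : Bool),
      naughtyLoop bad_words d dup bad l =
        (l.foldl (fun d c => (d.setdefault c 0).insert c (d.getD c 0 + 1)) d,
         dup || (l.zip l.tail).any (fun p => p.1 == p.2),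
         bad || (l.zip l.tail).any (fun p => bad_words.contains (String.ofList [p.1, p.2]))) := by
  intro l
  induction l with
  | nil => intro d dup bad; simp [naughtyLoop]
  | cons c rest ih =>
    intro d dup bad
    cases rest with
    | nil => simp [naughtyLoop]
    | cons c2 t =>
      have hdup : (if !dup then check_duplicate (String.ofList [c, c2]) else dup) = (dup || (c == c2)) := by
        cases dup
        · simp [check_duplicate, PySem.List.pyGet?, PySem.List.pyIdx?]
          rw [Bool.eq_iff_iff]; simp
        · simp
      have hbad : (if !bad && bad_words.contains (String.ofList [c, c2]) then true else bad)
          = (bad || bad_words.contains (String.ofList [c, c2])) := by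
        cases bad <;> simp
      have step : naughtyLoop bad_words d dup bad (c :: c2 :: t) =
          naughtyLoop bad_words ((d.setdefault c 0).insert c (d.getD c 0 + 1))
            (if !dup then check_duplicate (String.ofList [c, c2]) else dup)
            (if !bad && bad_words.contains (String.ofList [c, c2]) then true else bad)
            (c2 :: t) := rfl
      rw [step, hdup, hbad, ih]
      simp [List.zip, Bool.or_assoc]

-- the flags' final values, after starting from false
lemma flags_eq (bad_words : List String) (l : List Char) :
    naughtyLoop bad_words PySem.Dict.empty false false l =
      (l.foldl (fun d c => (d.setdefault c 0).insert c (d.getD c 0 + 1)) PySem.Dict.empty,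
       (l.zip l.tail).any (fun p => p.1 == p.2),
       (l.zip l.tail).any (fun p => bad_words.contains (String.ofList [p.1, p.2]))) := by
  simp [naughtyLoop_spec]

-- the counting foldl, read through getD
lemma getD_foldl_count (l : List Char) :
    ∀ (d : PySem.Dict Char Int) (v : Char),
      (l.foldl (fun d c => (d.setdefault c 0).insert c (d.getD c 0 + 1)) d).getD v 0 =
        d.getD v 0 + (l.count v : Int) := by
  induction l with
  | nil => intro d v; simp
  | cons c rest ih =>
    intro d v
    simp only [List.foldl_cons, ih, getD_step, List.count_cons]
    by_cases h : c = v
    · simp [h]; ring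
    · simp [h]

-- A's vowel_count (sum over the five vowels of the per-letter counts) equals B's sum of indicators
lemma vowel_sum (l : List Char) :
    (['a','e','i','o','u'] : List Char).foldl (fun (acc : Int) ch => acc + (l.count ch : Int)) 0
      = (l.map (fun c => if (['a','e','i','o','u'] : List Char).contains c then (1 : Int) else 0)).sum := by
  induction l with
  | nil => simp
  | cons c rest ih =>
    simp only [List.foldl, List.count_cons, List.map_cons, List.sum_cons] at *
    rw [← ih]
    by_cases ha : c = 'a' <;> by_cases he : c = 'e' <;> by_cases hi : c = 'i' <;>
      by_cases ho : c = 'o' <;> by_cases hu : c = 'u' <;>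
      simp_all <;> linarith

-- ===== VERDICT (by name: the statement is the Claim_ definition above) =====
theorem naughty_check_spec : Claim_equal_naughty_check := by
  intro bad_words line_in _
  unfold Spec_naughty_check naughty_check naughty_check_alt
  rw [flags_eq]
  have hv : "aeiou".toList = (['a','e','i','o','u'] : List Char) := rfl
  simp only [hv, getD_foldl_count, PySem.Dict.getD_empty, zero_add, vowel_sum]
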